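-- pv_equiv track=rewrite | github.com/pierpaolo28/Algorithms | Interview Questions/Cisco.py | solution
-- ===== SOURCE A (Python) =====
-- def solution(A):
--     # write your code in Python 3.6
--     maxn = 0
--     dicts = {}
--     for i in range(len(A) - 1):
--         if A[i] < A[i + 1]:
--             maxn += 1
--         else:
--             dicts[i - maxn] = maxn
--             maxn = 0
--
--     return max(dicts, key=dicts.get)
-- ===== SOURCE B (Python) =====
-- def solution(A):
--     # Boundary-based rewrite: collect descent positions, turn consecutive
--     # boundaries into (length, start) runs, pick the first longest run's start.
--     descents = [i for i in range(len(A) - 1) if A[i] >= A[i + 1]]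
--     runs = []
--     prev = -1
--     for d in descents:
--         runs.append((d - prev - 1, prev + 1))
--         prev = d
--     return max(runs, key=lambda r: r[0])[1]
-- ===== Notes on version B (the rewrite author's own statement) =====
-- stated objective: alternative
-- what changed: B first extracts the list of descent positions, then folds over those boundaries producing (length, start) runs and takes the first maximum, instead of A's running streak counter writing into a dictionary and a key-max over it.
import Mathlib
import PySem

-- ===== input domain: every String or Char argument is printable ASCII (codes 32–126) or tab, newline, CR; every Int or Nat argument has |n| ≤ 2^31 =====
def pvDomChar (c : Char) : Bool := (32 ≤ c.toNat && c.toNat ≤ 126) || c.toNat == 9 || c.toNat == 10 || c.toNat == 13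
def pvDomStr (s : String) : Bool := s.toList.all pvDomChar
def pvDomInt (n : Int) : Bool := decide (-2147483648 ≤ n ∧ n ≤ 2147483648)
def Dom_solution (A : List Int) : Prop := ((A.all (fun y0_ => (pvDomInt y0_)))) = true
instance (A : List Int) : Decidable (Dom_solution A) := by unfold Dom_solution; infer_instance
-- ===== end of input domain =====

-- B recomputes the answer from descent boundaries (filter + boundary fold) instead of A's
-- running-streak dictionary; objective: alternative decomposition, same asymptotic cost.


-- ===== PORT A =====
def solution (A : List Int) : Int :=
  let st := (PySem.List.pyRange 0 ((A.length : Int) - 1)).foldl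
    (fun s i =>
      if PySem.List.pyGetD A i 0 < PySem.List.pyGetD A (i + 1) 0 then
        (s.1 + 1, s.2)
      else
        ((0 : Int), s.2.insert (i - s.1) s.1))
    ((0 : Int), (PySem.Dict.empty : PySem.Dict Int Int))
  -- max(dicts, key=dicts.get); empty dict (ValueError) is excluded by Pre_solution
  (PySem.List.max? st.2.keys (fun k => st.2.getD k 0)).getD 0

-- ===== PORT B =====
def solution_alt (A : List Int) : Int :=
  let descents := (PySem.List.pyRange 0 ((A.length : Int) - 1)).filter
    (fun i => decide (PySem.List.pyGetD A (i + 1) 0 ≤ PySem.List.pyGetD A i 0))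
  let st := descents.foldl
    (fun s d => (s.1 ++ [(d - s.2 - 1, s.2 + 1)], d))
    (([] : List (Int × Int)), (-1 : Int))
  -- max(runs, key=...)[1]; empty runs (ValueError) is excluded by Pre_solution
  ((PySem.List.max? st.1 (fun r => r.1)).map (fun r => r.2)).getD 0

-- ===== PRECONDITION & SPEC =====
-- Pre_ excludes exactly the inputs (length < 2 or strictly increasing) on which
-- Python's max() gets an empty sequence and A raises ValueError (B raises too).
def Pre_solution (A : List Int) : Prop :=
  (((List.range (A.length - 1)).map (fun k : Nat => (k : Int))).any
    (fun i => decide (PySem.List.pyGetD A (i + 1) 0 ≤ PySem.List.pyGetD A i 0))) = true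
instance (A : List Int) : Decidable (Pre_solution A) := by unfold Pre_solution; infer_instance
def pvWitness_solution : List Int := [3, 1, 2]

def Spec_solution (A : List Int) (out : Int) : Prop := out = solution_alt A
instance (A : List Int) (out : Int) : Decidable (Spec_solution A out) := by unfold Spec_solution; infer_instance

-- ===== CLAIM (what is proved, stated in full; the proofs are below) =====
def Claim_equal_solution : Prop := ∀ (A : List Int), Dom_solution A → Pre_solution A → Spec_solution A (solution A)

-- ===== LEMMAS AND PROOFS =====

-- A-side fold (streak counter + dictionary), over an arbitrary index list
def goA (A : List Int) (l : List Int) : Int × PySem.Dict Int Int :=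
  l.foldl
    (fun s i =>
      if PySem.List.pyGetD A i 0 < PySem.List.pyGetD A (i + 1) 0 then
        (s.1 + 1, s.2)
      else
        ((0 : Int), s.2.insert (i - s.1) s.1))
    ((0 : Int), (PySem.Dict.empty : PySem.Dict Int Int))

-- B-side fold (runs from descent boundaries), over an arbitrary index list
def goB (A : List Int) (l : List Int) : List (Int × Int) × Int :=
  (l.filter (fun i => decide (PySem.List.pyGetD A (i + 1) 0 ≤ PySem.List.pyGetD A i 0))).foldl
    (fun s d => (s.1 ++ [(d - s.2 - 1, s.2 + 1)], d))
    (([] : List (Int × Int)), (-1 : Int))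

-- Joint invariant relating A's dictionary/streak to B's runs/last-boundary
lemma fold_inv (A : List Int) (m : Nat) :
    (goA A ((List.range m).map (fun k : Nat => (k : Int)))).2.items
        = (goB A ((List.range m).map (fun k : Nat => (k : Int)))).1.map (fun r => (r.2, r.1))
      ∧ (goA A ((List.range m).map (fun k : Nat => (k : Int)))).1
        = (m : Int) - 1 - (goB A ((List.range m).map (fun k : Nat => (k : Int)))).2
      ∧ 0 ≤ (goA A ((List.range m).map (fun k : Nat => (k : Int)))).1
      ∧ (∀ r ∈ (goB A ((List.range m).map (fun k : Nat => (k : Int)))).1,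
          r.2 ≤ (goB A ((List.range m).map (fun k : Nat => (k : Int)))).2)
      ∧ List.Pairwise (· < ·)
          ((goB A ((List.range m).map (fun k : Nat => (k : Int)))).1.map (fun r => r.2)) := by
  induction m with
  | zero =>
      refine ⟨rfl, by norm_num [goA, goB], by norm_num [goA, goB], ?_, by simp [goB]⟩
      intro r hr; simp [goB] at hr
  | succ m ih =>
      obtain ⟨h1, h2, h3, h4, h5⟩ := ih
      have hsplit : (List.range (m + 1)).map (fun k : Nat => (k : Int))
          = (List.range m).map (fun k : Nat => (k : Int)) ++ [(m : Int)] := by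
        rw [List.range_succ, List.map_append]; rfl
      by_cases h : PySem.List.pyGetD A (m : Int) 0 < PySem.List.pyGetD A ((m : Int) + 1) 0
      · -- ascent at index m: B's state unchanged, A's streak grows
        have hgA : goA A ((List.range (m + 1)).map (fun k : Nat => (k : Int)))
            = ((goA A ((List.range m).map (fun k : Nat => (k : Int)))).1 + 1,
               (goA A ((List.range m).map (fun k : Nat => (k : Int)))).2) := by
          rw [hsplit]
          simp only [goA, List.foldl_append, List.foldl_cons, List.foldl_nil]
          rw [if_pos h]
        have hgB : goB A ((List.range (m + 1)).map (fun k : Nat => (k : Int)))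
            = goB A ((List.range m).map (fun k : Nat => (k : Int))) := by
          rw [hsplit]
          simp only [goB, List.filter_append, List.filter_cons, List.filter_nil,
            decide_eq_false (not_le.2 h), Bool.false_eq_true, if_false, List.append_nil]
        rw [hgA, hgB]
        exact ⟨h1, by push_cast; omega, by omega, h4, h5⟩
      · -- descent at index m: A inserts, B appends a run
        have hle : PySem.List.pyGetD A ((m : Int) + 1) 0 ≤ PySem.List.pyGetD A (m : Int) 0 :=
          not_lt.1 h
        have hgA : goA A ((List.range (m + 1)).map (fun k : Nat => (k : Int)))
            = ((0 : Int),
               (goA A ((List.range m).map (fun k : Nat => (k : Int)))).2.insert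
                 ((m : Int) - (goA A ((List.range m).map (fun k : Nat => (k : Int)))).1)
                 (goA A ((List.range m).map (fun k : Nat => (k : Int)))).1) := by
          rw [hsplit]
          simp only [goA, List.foldl_append, List.foldl_cons, List.foldl_nil]
          rw [if_neg h]
        have hgB : goB A ((List.range (m + 1)).map (fun k : Nat => (k : Int)))
            = ((goB A ((List.range m).map (fun k : Nat => (k : Int)))).1
                 ++ [((m : Int) - (goB A ((List.range m).map (fun k : Nat => (k : Int)))).2 - 1,
                      (goB A ((List.range m).map (fun k : Nat => (k : Int)))).2 + 1)],
               (m : Int)) := by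
          rw [hsplit]
          simp only [goB, List.filter_append, List.filter_cons, List.filter_nil,
            decide_eq_true hle, if_true, List.foldl_append, List.foldl_cons, List.foldl_nil]
        set d := (goA A ((List.range m).map (fun k : Nat => (k : Int)))).2 with hd
        set maxn := (goA A ((List.range m).map (fun k : Nat => (k : Int)))).1 with hmaxn
        set runs := (goB A ((List.range m).map (fun k : Nat => (k : Int)))).1 with hruns
        set prev := (goB A ((List.range m).map (fun k : Nat => (k : Int)))).2 with hprev
        have hkey : (m : Int) - maxn = prev + 1 := by omega
        have hprevm : prev < (m : Int) := by omega
        have hnc : d.contains (prev + 1) = false := by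
          simp only [PySem.Dict.contains, h1, List.any_map, List.any_eq_false]
          intro r hr
          have := h4 r hr
          simp only [Function.comp]
          intro hbe
          have : r.2 = prev + 1 := by exact_mod_cast (beq_iff_eq).1 hbe
          omega
        rw [hgA, hgB]
        refine ⟨?_, by push_cast; omega, le_refl 0, ?_, ?_⟩
        · rw [hkey, PySem.Dict.items_insert_of_not_contains d maxn hnc, h1, List.map_append]
          have : maxn = (m : Int) - prev - 1 := by omega
          simp [this]
        · intro r hr
          rcases List.mem_append.1 hr with hr | hr
          · exact le_of_lt (lt_of_le_of_lt (h4 r hr) hprevm)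
          · simp at hr; rw [hr]; omega
        · rw [List.map_append, List.pairwise_append]
          refine ⟨h5, by simp, ?_⟩
          intro a ha b hb
          simp only [List.mem_map] at ha
          obtain ⟨r, hr, hra⟩ := ha
          simp at hb
          have := h4 r hr
          omega

-- max over the mapped keys with an agreeing key function = mapped max over the pairs
def maxStep {α κ : Type} [LT κ] [DecidableLT κ] (key : α → κ) (acc : Option α) (x : α) : Option α :=
  match acc with
  | none => some x
  | some m => if key m < key x then some x else some m

lemma max?_eq_foldl_maxStep {α κ : Type} [LT κ] [DecidableLT κ] (xs : List α) (key : α → κ) :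
    PySem.List.max? xs key = xs.foldl (maxStep key) none := rfl

lemma foldl_max_map_snd (g : Int → Int) (l : List (Int × Int)) :
    ∀ (acc : Option (Int × Int)),
      (∀ r ∈ l, g r.2 = r.1) → (∀ r, acc = some r → g r.2 = r.1) →
      (l.map (fun r => r.2)).foldl (maxStep g) (acc.map (fun r => r.2))
        = (l.foldl (maxStep (fun r => r.1)) acc).map (fun r => r.2) := by
  induction l with
  | nil => intro acc _ _; simp
  | cons r t ih =>
      intro acc hl hacc
      have hr : g r.2 = r.1 := hl r (by simp)
      cases acc with
      | none =>
          simp only [List.map_cons, List.foldl_cons, Option.map_none, maxStep]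
          exact ih (some r) (fun x hx => hl x (by simp [hx]))
            (fun x hx => by cases hx; exact hr)
      | some q =>
          have hq : g q.2 = q.1 := hacc q rfl
          simp only [List.map_cons, List.foldl_cons, Option.map_some, maxStep]
          by_cases hlt : (q.1 : Int) < r.1
          · rw [if_pos (by rw [hq, hr]; exact hlt), if_pos hlt]
            exact ih (some r) (fun x hx => hl x (by simp [hx]))
              (fun x hx => by cases hx; exact hr)
          · rw [if_neg (by rw [hq, hr]; exact hlt), if_neg hlt]
            exact ih (some q) (fun x hx => hl x (by simp [hx]))
              (fun x hx => by cases hx; exact hq)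

lemma max?_map_snd (g : Int → Int) (l : List (Int × Int))
    (hl : ∀ r ∈ l, g r.2 = r.1) :
    PySem.List.max? (l.map (fun r => r.2)) g
      = (PySem.List.max? l (fun r => r.1)).map (fun r => r.2) := by
  have := foldl_max_map_snd g l none hl (fun r hr => by cases hr)
  rw [max?_eq_foldl_maxStep, max?_eq_foldl_maxStep]
  simpa using this

-- the ports' common index list is (range (len-1)) cast to Int
lemma pyRange_len (A : List Int) :
    PySem.List.pyRange 0 ((A.length : Int) - 1)
      = (List.range (A.length - 1)).map (fun k : Nat => (k : Int)) := by
  cases hA : A.length with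
  | zero => rfl
  | succ n =>
      have : ((n + 1 : Nat) : Int) - 1 = (n : Int) := by push_cast; omega
      rw [this, PySem.List.pyRange_zero_natCast]
      norm_num

-- ===== VERDICT (by name: the statement is the Claim_ definition above) =====
theorem solution_spec : Claim_equal_solution := by
  intro A _ _
  unfold Spec_solution solution solution_alt
  rw [pyRange_len]
  obtain ⟨h1, _, _, _, h5⟩ := fold_inv A (A.length - 1)
  show (PySem.List.max? (goA A _).2.keys (fun k => (goA A _).2.getD k 0)).getD 0
      = ((PySem.List.max? (goB A _).1 (fun r => r.1)).map (fun r => r.2)).getD 0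
  set d := (goA A ((List.range (A.length - 1)).map (fun k : Nat => (k : Int)))).2 with hd
  set runs := (goB A ((List.range (A.length - 1)).map (fun k : Nat => (k : Int)))).1 with hruns
  have hkeys : d.keys = runs.map (fun r => r.2) := by
    simp only [PySem.Dict.keys, h1, List.map_map]; rfl
  have hnd : d.keys.Nodup := by rw [hkeys]; exact h5.nodup
  have hg : ∀ r ∈ runs, d.getD r.2 0 = r.1 := by
    intro r hr
    exact PySem.Dict.getD_of_mem_items d (by rw [h1]; exact List.mem_map_of_mem hr) hnd 0
  rw [hkeys, max?_map_snd _ runs hg]
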